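-- pv_equiv track=rewrite | github.com/elfried96/Memoiretest | intelligent-surveillance-system/dashboard/vlm_chatbot_symbiosis.py | _determine_mission_focus
-- ===== SOURCE A (Python) =====
-- from typing import Dict, List, Any, Optional, Tuple
--
-- def _determine_mission_focus(question: str, context: Dict[str, Any]) -> List[str]:
--     """Détermine le focus de la mission."""
--
--     focus_areas = []
--     question_lower = question.lower()
--
--     if "performance" in question_lower or "compare" in question_lower:
--         focus_areas.append("performance_analysis")
--     if "outils" in question_lower:
--         focus_areas.append("tool_analysis")
--     if "config" in question_lower:
--         focus_areas.append("configuration_optimization")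
--     if any(word in question_lower for word in ["voir", "détaille", "suspect"]):
--         focus_areas.append("behavioral_analysis")
--
--     return focus_areas if focus_areas else ["general_analysis"]
-- ===== SOURCE B (Python) =====
-- _TAGS = ["performance_analysis", "tool_analysis",
--          "configuration_optimization", "behavioral_analysis"]
--
-- # Precomputed decision table: row `code` holds the tags for bit pattern `code`
-- # (bit 0 = performance rule, bit 1 = outils, bit 2 = config, bit 3 = behavioral),
-- # with the default answer stored at the all-zero row.
-- _TABLE = []
-- for code in range(16):
--     tags = [tag for bit, tag in enumerate(_TAGS) if (code >> bit) & 1]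
--     _TABLE.append(tags if tags else ["general_analysis"])
--
-- def _determine_mission_focus(question, context):
--     q = question.lower()
--     code = (1 if ("performance" in q or "compare" in q) else 0) \
--          + (2 if "outils" in q else 0) \
--          + (4 if "config" in q else 0) \
--          + (8 if ("voir" in q or "détaille" in q or "suspect" in q) else 0)
--     return list(_TABLE[code])
-- ===== Notes on version B (the rewrite author's own statement) =====
-- stated objective: alternative
-- what changed: B packs the four substring tests into a 4-bit code and returns the matching row of a precomputed 16-entry decision table (default row at code 0), instead of A's sequence of conditional appends.
import Mathlib
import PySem

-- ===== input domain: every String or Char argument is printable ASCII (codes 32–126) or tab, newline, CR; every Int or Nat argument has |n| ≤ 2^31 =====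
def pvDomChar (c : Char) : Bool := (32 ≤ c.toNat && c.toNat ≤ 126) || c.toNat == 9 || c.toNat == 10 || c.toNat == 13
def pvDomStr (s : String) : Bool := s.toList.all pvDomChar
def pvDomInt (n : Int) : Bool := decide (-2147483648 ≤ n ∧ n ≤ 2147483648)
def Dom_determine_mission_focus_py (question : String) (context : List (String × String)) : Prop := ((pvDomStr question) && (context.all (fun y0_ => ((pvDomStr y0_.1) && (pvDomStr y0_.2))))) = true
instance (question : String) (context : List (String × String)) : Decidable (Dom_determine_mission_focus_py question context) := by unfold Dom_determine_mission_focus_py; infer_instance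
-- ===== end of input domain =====

-- B replaces A's sequence of conditional appends by a 4-bit code indexing a precomputed
-- 16-entry decision table (default row at code 0); objective: alternative formulation.

-- ===== PORT A =====
def determine_mission_focus_py (question : String) (context : List (String × String)) : List String :=
  let question_lower := PySem.Str.lower question
  let focus_areas : List String := []
  let focus_areas := if PySem.Str.isIn "performance" question_lower || PySem.Str.isIn "compare" question_lower
    then focus_areas ++ ["performance_analysis"] else focus_areas
  let focus_areas := if PySem.Str.isIn "outils" question_lower
    then focus_areas ++ ["tool_analysis"] else focus_areas
  let focus_areas := if PySem.Str.isIn "config" question_lower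
    then focus_areas ++ ["configuration_optimization"] else focus_areas
  let focus_areas := if (["voir", "détaille", "suspect"].any fun word => PySem.Str.isIn word question_lower)
    then focus_areas ++ ["behavioral_analysis"] else focus_areas
  if focus_areas.isEmpty then ["general_analysis"] else focus_areas

-- ===== PORT B =====
-- Source B's module-level tag list and precomputed decision table
def pvFocusTags : List String :=
  ["performance_analysis", "tool_analysis", "configuration_optimization", "behavioral_analysis"]

def pvFocusTable : List (List String) :=
  (List.range 16).map fun code =>
    let tags := (PySem.List.enumerate pvFocusTags).filterMap
      (fun bt => if (code >>> bt.1.toNat) % 2 = 1 then some bt.2 else none)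
    if tags.isEmpty then ["general_analysis"] else tags

def determine_mission_focus_py_alt (question : String) (context : List (String × String)) : List String :=
  let q := PySem.Str.lower question
  let code : Nat :=
      (if PySem.Str.isIn "performance" q || PySem.Str.isIn "compare" q then 1 else 0)
    + (if PySem.Str.isIn "outils" q then 2 else 0)
    + (if PySem.Str.isIn "config" q then 4 else 0)
    + (if PySem.Str.isIn "voir" q || PySem.Str.isIn "détaille" q || PySem.Str.isIn "suspect" q then 8 else 0)
  pvFocusTable.getD code []

-- ===== PRECONDITION & SPEC =====
def Spec_determine_mission_focus_py (question : String) (context : List (String × String)) (out : List String) : Prop := out = determine_mission_focus_py_alt question context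
instance (question : String) (context : List (String × String)) (out : List String) : Decidable (Spec_determine_mission_focus_py question context out) := by unfold Spec_determine_mission_focus_py; infer_instance

-- ===== CLAIM (what is proved, stated in full; the proofs are below) =====
def Claim_equal_determine_mission_focus_py : Prop := ∀ (question : String) (context : List (String × String)), Dom_determine_mission_focus_py question context → Spec_determine_mission_focus_py question context (determine_mission_focus_py question context)

-- ===== LEMMAS AND PROOFS =====

-- ===== VERDICT (by name: the statement is the Claim_ definition above) =====
theorem determine_mission_focus_py_spec : Claim_equal_determine_mission_focus_py := by
  intro question context _
  unfold Spec_determine_mission_focus_py determine_mission_focus_py determine_mission_focus_py_alt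
  simp only [List.any_cons, List.any_nil, Bool.or_false]
  generalize PySem.Str.isIn "performance" (PySem.Str.lower question) = b1
  generalize PySem.Str.isIn "compare" (PySem.Str.lower question) = b2
  generalize PySem.Str.isIn "outils" (PySem.Str.lower question) = b3
  generalize PySem.Str.isIn "config" (PySem.Str.lower question) = b4
  generalize PySem.Str.isIn "voir" (PySem.Str.lower question) = b5
  generalize PySem.Str.isIn "détaille" (PySem.Str.lower question) = b6
  generalize PySem.Str.isIn "suspect" (PySem.Str.lower question) = b7
  revert b1 b2 b3 b4 b5 b6 b7
  decide
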